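-- pv_equiv track=rewrite | github.com/stefi19/GenerateTimetableFromOutlookCalendar | tools/parse_room_template.py | find_name_field
-- ===== SOURCE A (Python) =====
-- def find_name_field(headers):
--     # Prefer exact 'Nume_Sala' or 'Nume Sala', else any header containing 'sala' or 'room'
--     candidates = [h for h in headers if h.lower() in ('nume_sala', 'nume sala', 'nume', 'name')]
--     if candidates:
--         return candidates[0]
--     for h in headers:
--         if 'sala' in h.lower() or 'room' in h.lower():
--             return h
--     # fallback to first header
--     return headers[0] if headers else None
-- ===== SOURCE B (Python) =====
-- def find_name_field(headers):
--     exact = ('nume_sala', 'nume sala', 'nume', 'name')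
--     sub_match = None
--     for h in headers:
--         hl = h.lower()
--         if hl in exact:
--             return h
--         if sub_match is None and ('sala' in hl or 'room' in hl):
--             sub_match = h
--     if sub_match is not None:
--         return sub_match
--     return headers[0] if headers else None
-- ===== Notes on version B (the rewrite author's own statement) =====
-- stated objective: simpler
-- what changed: Replaces A's eager filter pass plus a second substring-scan loop with a single early-returning pass that tracks the first substring match in one slot.
import Mathlib
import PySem

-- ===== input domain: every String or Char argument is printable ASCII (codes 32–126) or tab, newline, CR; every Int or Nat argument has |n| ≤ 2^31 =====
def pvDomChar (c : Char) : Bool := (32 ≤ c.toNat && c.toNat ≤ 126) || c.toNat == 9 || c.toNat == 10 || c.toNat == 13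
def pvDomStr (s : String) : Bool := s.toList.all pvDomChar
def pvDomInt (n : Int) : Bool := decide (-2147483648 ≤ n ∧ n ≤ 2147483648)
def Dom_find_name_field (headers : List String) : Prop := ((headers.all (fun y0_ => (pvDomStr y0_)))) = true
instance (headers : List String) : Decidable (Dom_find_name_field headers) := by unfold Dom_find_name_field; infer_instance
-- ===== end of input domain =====

-- B replaces A's filter pass + separate substring loop with one early-returning pass tracking a substring-match slot (simpler decomposition, same behaviour).


-- ===== PORT A =====
def find_name_field (headers : List String) : Option String :=
  let candidates := headers.filter
    (fun h => ["nume_sala", "nume sala", "nume", "name"].contains (PySem.Str.lower h))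
  match candidates with
  | c :: _ => some c
  | [] =>
    match headers.find? (fun h =>
        PySem.Str.isIn "sala" (PySem.Str.lower h) || PySem.Str.isIn "room" (PySem.Str.lower h)) with
    | some h => some h
    | none => headers.head?

-- ===== PORT B =====
-- single pass: return on an exact (lowercased) match, remember the first substring match
def findNameGo : List String → Option String → Option String
  | [], subMatch => subMatch
  | h :: rest, subMatch =>
    let hl := PySem.Str.lower h
    if hl == "nume_sala" || hl == "nume sala" || hl == "nume" || hl == "name" then
      some h
    else
      findNameGo rest
        (if subMatch.isNone && (PySem.Str.isIn "sala" hl || PySem.Str.isIn "room" hl)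
         then some h else subMatch)

def find_name_field_alt (headers : List String) : Option String :=
  match findNameGo headers none with
  | some r => some r
  | none => headers.head?

-- ===== PRECONDITION & SPEC =====
def Spec_find_name_field (headers : List String) (out : Option String) : Prop := out = find_name_field_alt headers
instance (headers : List String) (out : Option String) : Decidable (Spec_find_name_field headers out) := by unfold Spec_find_name_field; infer_instance

-- ===== CLAIM (what is proved, stated in full; the proofs are below) =====
def Claim_equal_find_name_field : Prop := ∀ (headers : List String), Dom_find_name_field headers → Spec_find_name_field headers (find_name_field headers)

-- ===== LEMMAS AND PROOFS =====

theorem str_beq_decide (a b : String) : (a == b) = decide (a = b) := by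
  by_cases h : a = b <;> simp [h]

-- A's tuple-membership predicate equals B's chained comparison
theorem predE_eq :
    (fun h => (["nume_sala", "nume sala", "nume", "name"] : List String).contains (PySem.Str.lower h)) =
    (fun h : String => PySem.Str.lower h == "nume_sala" || (PySem.Str.lower h == "nume sala" ||
        (PySem.Str.lower h == "nume" || PySem.Str.lower h == "name"))) := by
  funext h
  simp [str_beq_decide]

-- B's accumulator loop, characterised: first exact match wins, else the accumulator, else the first substring match
theorem findNameGo_eq (headers : List String) (subMatch : Option String) :
    findNameGo headers subMatch =
      match headers.find? (fun h => PySem.Str.lower h == "nume_sala" || (PySem.Str.lower h == "nume sala" ||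
          (PySem.Str.lower h == "nume" || PySem.Str.lower h == "name"))) with
      | some c => some c
      | none =>
        match subMatch with
        | some s => some s
        | none => headers.find? (fun h =>
            PySem.Str.isIn "sala" (PySem.Str.lower h) || PySem.Str.isIn "room" (PySem.Str.lower h)) := by
  induction headers generalizing subMatch with
  | nil => cases subMatch <;> rfl
  | cons h rest ih =>
    cases hx : (PySem.Str.lower h == "nume_sala" || (PySem.Str.lower h == "nume sala" ||
        (PySem.Str.lower h == "nume" || PySem.Str.lower h == "name"))) with
    | true =>
      simp [findNameGo, hx]
      intro h1 h2 h3 h4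
      simp [h1, h2, h3, h4] at hx
    | false =>
      simp only [findNameGo, List.find?_cons, hx]
      rw [ih]
      cases subMatch with
      | some s =>
        simp
        intro hc
        rcases hc with (((e | e) | e) | e) <;> simp [e] at hx
      | none =>
        cases hs : (PySem.Str.isIn "sala" (PySem.Str.lower h) ||
            PySem.Str.isIn "room" (PySem.Str.lower h)) with
        | true =>
          simp only [Option.isNone_none, Bool.true_and, if_pos]
          cases hfind : rest.find? (fun h => PySem.Str.lower h == "nume_sala" || (PySem.Str.lower h == "nume sala" ||
              (PySem.Str.lower h == "nume" || PySem.Str.lower h == "name"))) with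
          | some c =>
            simp
            intro hc
            rcases hc with (((e | e) | e) | e) <;> simp [e] at hx
          | none => simp
        | false =>
          simp
          intro hc
          rcases hc with (((e | e) | e) | e) <;> simp [e] at hx

-- A, characterised the same way (head of the filter is the first match)
theorem find_name_field_eq (headers : List String) :
    find_name_field headers =
      match headers.find? (fun h => PySem.Str.lower h == "nume_sala" || (PySem.Str.lower h == "nume sala" ||
          (PySem.Str.lower h == "nume" || PySem.Str.lower h == "name"))) with
      | some c => some c
      | none =>
        match headers.find? (fun h =>
            PySem.Str.isIn "sala" (PySem.Str.lower h) || PySem.Str.isIn "room" (PySem.Str.lower h)) with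
        | some h => some h
        | none => headers.head? := by
  unfold find_name_field
  rw [predE_eq]
  rw [← List.head?_filter (p := fun h : String => PySem.Str.lower h == "nume_sala" || (PySem.Str.lower h == "nume sala" ||
      (PySem.Str.lower h == "nume" || PySem.Str.lower h == "name"))) (l := headers)]
  cases hfl : headers.filter (fun h : String => PySem.Str.lower h == "nume_sala" || (PySem.Str.lower h == "nume sala" ||
      (PySem.Str.lower h == "nume" || PySem.Str.lower h == "name"))) <;> rfl

-- ===== VERDICT (by name: the statement is the Claim_ definition above) =====
theorem find_name_field_spec : Claim_equal_find_name_field := by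
  intro headers _
  unfold Spec_find_name_field find_name_field_alt
  rw [findNameGo_eq, find_name_field_eq]
  cases headers.find? (fun h => PySem.Str.lower h == "nume_sala" || (PySem.Str.lower h == "nume sala" ||
      (PySem.Str.lower h == "nume" || PySem.Str.lower h == "name"))) with
  | some c => rfl
  | none =>
    cases headers.find? (fun h =>
        PySem.Str.isIn "sala" (PySem.Str.lower h) || PySem.Str.isIn "room" (PySem.Str.lower h)) <;> rfl
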